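-- pv_equiv track=rewrite | github.com/kh277/BOJ | 백준/Silver/12933. 오리/오리.py | solve
-- ===== SOURCE A (Python) =====
-- def solve(string: str) -> int:
--     # 올바른 문자열인지 확인
--     check = [False for _ in range(len(string))]
--     quack = [[] for _ in range(5)]
--
--     for i in range(len(string)):
--         if string[i] == 'q':
--             quack[0].append(i)
--         elif string[i] == 'u':
--             quack[1].append(i)
--         elif string[i] == 'a':
--             quack[2].append(i)
--         elif string[i] == 'c':
--             quack[3].append(i)
--         elif string[i] == 'k':
--             quack[4].append(i)
--
--     if not (len(quack[0]) == len(quack[1]) == len(quack[2]) == len(quack[3]) == len(quack[4])):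
--         return -1
--
--     for i in range(len(quack[0])):
--         temp = -1
--         for j in range(5):
--             if temp < quack[j][i]:
--                 temp = quack[j][i]
--             else:
--                 return -1
--
--     # 최대 중첩 개수 확인
--     result = 0
--     temp = 0
--     for i in range(len(string)):
--         if string[i] == 'q':
--             temp += 1
--             result = max(result, temp)
--         elif string[i] == 'k':
--             temp -= 1
--
--     return result
-- ===== SOURCE B (Python) =====
-- def solve(string: str) -> int:
--     # single left-to-right pass: five running letter counts with the
--     # monotonicity invariant cq>=cu>=ca>=cc>=ck, plus a nesting counter
--     cq = cu = ca = cc = ck = 0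
--     cur = best = 0
--     for ch in string:
--         if ch == 'q':
--             cq += 1
--             cur += 1
--             if cur > best:
--                 best = cur
--         elif ch == 'u':
--             cu += 1
--         elif ch == 'a':
--             ca += 1
--         elif ch == 'c':
--             cc += 1
--         elif ch == 'k':
--             ck += 1
--             cur -= 1
--         else:
--             continue
--         if not (cq >= cu >= ca >= cc >= ck):
--             return -1
--     if not (cq == cu == ca == cc == ck):
--         return -1
--     return best
-- ===== Notes on version B (the rewrite author's own statement) =====
-- stated objective: simpler
-- what changed: A builds five position lists in one pass, then validates by comparing the i-th positions of q,u,a,c,k across those lists in a second nested pass and computes the nesting depth in a third pass; B is one single left-to-right pass over the string keeping five running letter counts (validity = the counts stay monotone cq>=cu>=ca>=cc>=ck at every prefix and are all equal at the end) fused with the nesting counter, returning -1 at the first violation.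
import Mathlib
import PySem

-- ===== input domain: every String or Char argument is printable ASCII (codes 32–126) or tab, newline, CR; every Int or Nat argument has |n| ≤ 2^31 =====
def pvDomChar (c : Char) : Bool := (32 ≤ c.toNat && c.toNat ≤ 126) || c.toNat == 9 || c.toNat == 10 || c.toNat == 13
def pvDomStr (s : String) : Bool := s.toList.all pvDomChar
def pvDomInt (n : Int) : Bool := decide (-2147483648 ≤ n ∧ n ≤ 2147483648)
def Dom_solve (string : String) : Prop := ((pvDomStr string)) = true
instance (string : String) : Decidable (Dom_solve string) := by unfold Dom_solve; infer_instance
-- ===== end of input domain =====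

-- B replaces A's three passes (index lists + cross-list position check + nesting pass) by one
-- fused left-to-right pass over running letter counts; objective: simpler.

-- ===== PORT A =====
-- state of A's first loop: the five index lists quack[0]..quack[4]
def pvBuildStep (cs : List Char) (st : List Int × List Int × List Int × List Int × List Int)
    (i : Int) : List Int × List Int × List Int × List Int × List Int :=
  let c := PySem.List.pyGetD cs i ' '   -- string[i]; i is always in range in A's loops, so exact
  if c = 'q' then (st.1 ++ [i], st.2.1, st.2.2.1, st.2.2.2.1, st.2.2.2.2)
  else if c = 'u' then (st.1, st.2.1 ++ [i], st.2.2.1, st.2.2.2.1, st.2.2.2.2)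
  else if c = 'a' then (st.1, st.2.1, st.2.2.1 ++ [i], st.2.2.2.1, st.2.2.2.2)
  else if c = 'c' then (st.1, st.2.1, st.2.2.1, st.2.2.2.1 ++ [i], st.2.2.2.2)
  else if c = 'k' then (st.1, st.2.1, st.2.2.1, st.2.2.2.1, st.2.2.2.2 ++ [i])
  else st

-- A's inner 'for j in range(5)' with its early return: a fold over the five values quack[j][i]
def pvInnerStep (t? : Option Int) (v : Int) : Option Int :=
  match t? with
  | none => none
  | some t => if t < v then some v else none

-- A's third loop body, state (result, temp)
def pvNestStep (s : Int × Int) (c : Char) : Int × Int :=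
  if c = 'q' then (max s.1 (s.2 + 1), s.2 + 1)
  else if c = 'k' then (s.1, s.2 - 1)
  else s

def solve (string : String) : Int :=
  let cs := string.toList
  let n : Int := (cs.length : Int)
  let quack := (PySem.List.pyRange 0 n 1).foldl (pvBuildStep cs) ([], [], [], [], [])
  let q0 := quack.1
  let q1 := quack.2.1
  let q2 := quack.2.2.1
  let q3 := quack.2.2.2.1
  let q4 := quack.2.2.2.2
  if ¬ (q0.length = q1.length ∧ q1.length = q2.length ∧ q2.length = q3.length ∧
        q3.length = q4.length) then -1
  else if ¬ ((PySem.List.pyRange 0 (q0.length : Int) 1).all (fun i =>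
      (([PySem.List.pyGetD q0 i 0, PySem.List.pyGetD q1 i 0, PySem.List.pyGetD q2 i 0,
         PySem.List.pyGetD q3 i 0, PySem.List.pyGetD q4 i 0]).foldl pvInnerStep
        (some (-1))).isSome)) then -1
  else
    ((PySem.List.pyRange 0 n 1).foldl
      (fun (s : Int × Int) j => pvNestStep s (PySem.List.pyGetD cs j ' ')) (0, 0)).1

-- ===== PORT B =====
-- B's single-pass state: (cq, cu, ca, cc, ck, cur, best); none = already returned -1
def pvAltStep (st? : Option (Int × Int × Int × Int × Int × Int × Int)) (ch : Char) :
    Option (Int × Int × Int × Int × Int × Int × Int) :=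
  match st? with
  | none => none
  | some (cq, cu, ca, cc, ck, cur, best) =>
    if ch = 'q' then
      let cq := cq + 1
      let cur := cur + 1
      let best := if cur > best then cur else best
      if cu ≤ cq ∧ ca ≤ cu ∧ cc ≤ ca ∧ ck ≤ cc then some (cq, cu, ca, cc, ck, cur, best)
      else none
    else if ch = 'u' then
      let cu := cu + 1
      if cu ≤ cq ∧ ca ≤ cu ∧ cc ≤ ca ∧ ck ≤ cc then some (cq, cu, ca, cc, ck, cur, best)
      else none
    else if ch = 'a' then
      let ca := ca + 1
      if cu ≤ cq ∧ ca ≤ cu ∧ cc ≤ ca ∧ ck ≤ cc then some (cq, cu, ca, cc, ck, cur, best)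
      else none
    else if ch = 'c' then
      let cc := cc + 1
      if cu ≤ cq ∧ ca ≤ cu ∧ cc ≤ ca ∧ ck ≤ cc then some (cq, cu, ca, cc, ck, cur, best)
      else none
    else if ch = 'k' then
      let ck := ck + 1
      let cur := cur - 1
      if cu ≤ cq ∧ ca ≤ cu ∧ cc ≤ ca ∧ ck ≤ cc then some (cq, cu, ca, cc, ck, cur, best)
      else none
    else some (cq, cu, ca, cc, ck, cur, best)

def solve_alt (string : String) : Int :=
  match string.toList.foldl pvAltStep (some (0, 0, 0, 0, 0, 0, 0)) with
  | none => -1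
  | some (cq, cu, ca, cc, ck, _, best) =>
    if cq = cu ∧ cu = ca ∧ ca = cc ∧ cc = ck then best else -1

-- ===== PRECONDITION & SPEC =====
def Spec_solve (string : String) (out : Int) : Prop := out = solve_alt string
instance (string : String) (out : Int) : Decidable (Spec_solve string out) := by unfold Spec_solve; infer_instance

-- ===== CLAIM (what is proved, stated in full; the proofs are below) =====
def Claim_equal_solve : Prop := ∀ (string : String), Dom_solve string → Spec_solve string (solve string)

-- ===== LEMMAS AND PROOFS =====

theorem pv_map_getD_range (l : List Char) (d : Char) :
    (List.range l.length).map (fun j => l.getD j d) = l := by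
  apply List.ext_getElem (by simp)
  intro i h1 h2; simp [List.getD_eq_getElem?_getD, List.getElem?_eq_getElem h2]

def pvIdx (cs : List Char) (c : Char) : List Nat :=
  (List.range cs.length).filter (fun j => cs.getD j ' ' == c)

theorem pvIdx_length (cs : List Char) (c : Char) : (pvIdx cs c).length = cs.count c := by
  conv_rhs => rw [← pv_map_getD_range cs ' ']
  rw [pvIdx, List.count, List.countP_map, ← List.countP_eq_length_filter]
  rfl

def pvCLt (L : List Nat) (m : Nat) : Nat := (L.filter (fun x => x < m)).length

theorem pv_filter_range_lt (p : Nat → Bool) (n m : Nat) :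
    (List.range n).filter (fun j => decide (j < m) && p j) = (List.range (min m n)).filter p := by
  induction n with
  | zero => simp
  | succ n ih =>
    by_cases h : n < m
    · have : min m (n+1) = min m n + 1 := by omega
      rw [List.range_succ, List.filter_append, ih, this, List.range_succ, List.filter_append]
      simp [List.filter_cons, h, show min m n = n by omega]
    · have : min m (n+1) = min m n := by omega
      rw [List.range_succ, List.filter_append, ih, this]
      simp [h]

theorem pvCLt_idx (cs : List Char) (c : Char) (m : Nat) :
    pvCLt (pvIdx cs c) m = (cs.take m).count c := by
  rw [pvCLt, pvIdx, List.filter_filter, pv_filter_range_lt]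
  have hlen : (cs.take m).length = min m cs.length := by simp
  have : (List.range (min m cs.length)).filter (fun j => cs.getD j ' ' == c)
       = (List.range (cs.take m).length).filter (fun j => (cs.take m).getD j ' ' == c) := by
    rw [hlen]
    apply List.filter_congr
    intro j hj
    rw [List.mem_range] at hj
    have h1 : j < cs.length := by omega
    have h2 : j < (cs.take m).length := by omega
    rw [List.getD_eq_getElem _ _ h1, List.getD_eq_getElem _ _ h2, List.getElem_take]
  rw [this, ← pvIdx, pvIdx_length]

def pvI (cs : List Char) (c : Char) (m : Nat) : List Int :=
  List.map (fun j : Nat => (j : Int)) ((List.range m).filter (fun j => cs.getD j ' ' == c))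

theorem pvBuild_eq (cs : List Char) (m : Nat) :
    (PySem.List.pyRange 0 (m : Int) 1).foldl (pvBuildStep cs) ([], [], [], [], []) =
      (pvI cs 'q' m, pvI cs 'u' m, pvI cs 'a' m, pvI cs 'c' m, pvI cs 'k' m) := by
  induction m with
  | zero => simp [pvI, PySem.List.pyRange_one_eq_nil]
  | succ m ih =>
    have : ((m + 1 : Nat) : Int) = (m : Int) + 1 := by push_cast; ring
    rw [this, PySem.List.pyRange_one_succ_right (by positivity), List.foldl_append, ih]
    simp only [List.foldl_cons, List.foldl_nil, pvBuildStep, pvI, List.range_succ,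
      List.filter_append, PySem.List.pyGetD_natCast, List.filter_cons, List.filter_nil]
    by_cases hq : cs.getD m ' ' = 'q' <;> by_cases hu : cs.getD m ' ' = 'u' <;>
      by_cases ha : cs.getD m ' ' = 'a' <;> by_cases hc : cs.getD m ' ' = 'c' <;>
      by_cases hk : cs.getD m ' ' = 'k' <;> simp_all

theorem pvCLt_le_length (L : List Nat) (m : Nat) : pvCLt L m ≤ L.length :=
  List.length_filter_le _ _

theorem pvCLt_char (L : List Nat) (hs : L.Pairwise (· < ·)) (m : Nat) :
    ∀ i (h : i < L.length), (L[i] < m ↔ i < pvCLt L m) := by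
  induction L with
  | nil => intro i h; simp at h
  | cons x xs ih =>
    rw [List.pairwise_cons] at hs
    intro i h
    by_cases hx : x < m
    · have : pvCLt (x :: xs) m = pvCLt xs m + 1 := by simp [pvCLt, hx]
      rw [this]
      cases i with
      | zero => simpa using hx
      | succ i =>
        have := ih hs.2 i (by simpa using h)
        simpa using this
    · have h0 : pvCLt xs m = 0 := by
        rw [pvCLt, List.length_eq_zero_iff, List.filter_eq_nil_iff]
        intro a ha
        have := hs.1 a ha
        simp; omega
      have : pvCLt (x :: xs) m = 0 := by simp [pvCLt, hx] at h0 ⊢; exact h0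
      rw [this]
      cases i with
      | zero => simpa using hx
      | succ i =>
        have hi' : i < xs.length := by simpa using h
        simp only [List.getElem_cons_succ]
        have hmem : xs[i]'hi' ∈ xs := List.getElem_mem _
        have := hs.1 _ hmem
        constructor
        · intro hlt; omega
        · omega

theorem pv_pair_iff (p q : List Nat) (hp : p.Pairwise (· < ·)) (hq : q.Pairwise (· < ·))
    (hlen : p.length = q.length) (hd : ∀ x ∈ p, x ∉ q) :
    (∀ i (h : i < p.length), p[i] < q[i]'(hlen ▸ h)) ↔ (∀ m, pvCLt q m ≤ pvCLt p m) := by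
  constructor
  · intro hc m
    set k := pvCLt q m with hk
    rcases Nat.eq_zero_or_pos k with h0 | h0
    · omega
    · have hkq : k ≤ q.length := pvCLt_le_length q m
      have hi : k - 1 < q.length := by omega
      have hqi : q[k-1] < m := (pvCLt_char q hq m (k-1) hi).2 (by omega)
      have hpi : p[k-1]'(by omega) < m := lt_trans (hc (k-1) (by omega)) hqi
      have := (pvCLt_char p hp m (k-1) (by omega)).1 hpi
      omega
  · intro hc i h
    have hiq : i < q.length := hlen ▸ h
    have h1 : i < pvCLt q (q[i] + 1) := (pvCLt_char q hq _ i hiq).1 (by omega)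
    have h2 : i < pvCLt p (q[i] + 1) := lt_of_lt_of_le h1 (hc _)
    have h3 : p[i] < q[i] + 1 := (pvCLt_char p hp _ i h).2 h2
    have hne : p[i] ≠ q[i] := by
      intro heq
      apply hd _ (List.getElem_mem _)
      rw [heq]
      exact List.getElem_mem _
    omega


def pvChain (l : List Char) : Prop :=
  l.count 'u' ≤ l.count 'q' ∧ l.count 'a' ≤ l.count 'u' ∧
  l.count 'c' ≤ l.count 'a' ∧ l.count 'k' ≤ l.count 'c'

def pvAllChain (l : List Char) : Prop := ∀ m : Nat, pvChain (l.take m)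

theorem pvChain_nil : pvChain [] := by simp [pvChain]

theorem pvAllChain_nil : pvAllChain [] := fun m => by simpa using pvChain_nil

theorem pvChain_of_allChain {l : List Char} (h : pvAllChain l) : pvChain l := by
  have := h l.length
  simpa using this

theorem pvAllChain_append (l : List Char) (x : Char) :
    pvAllChain (l ++ [x]) ↔ pvAllChain l ∧ pvChain (l ++ [x]) := by
  constructor
  · intro h
    refine ⟨fun m => ?_, ?_⟩
    case refine_2 =>
      have := h (l.length + 1)
      rwa [List.take_of_length_le (by simp)] at this
    rcases le_or_gt m l.length with hm | hm
    · have := h m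
      rwa [List.take_append_of_le_length hm] at this
    · rw [List.take_of_length_le (by omega)]
      exact pvChain_of_allChain fun m' => by
        have := h m'
        rcases le_or_gt m' l.length with h' | h'
        · rwa [List.take_append_of_le_length h'] at this
        · rw [List.take_of_length_le (by omega)]
          have := h l.length
          rwa [List.take_append_of_le_length le_rfl, List.take_length] at this
  · rintro ⟨h1, h2⟩ m
    rcases le_or_gt m l.length with hm | hm
    · rw [List.take_append_of_le_length hm]
      exact by simpa using h1 m
    · rw [List.take_of_length_le (by simp; omega)]
      exact h2

theorem pvB_inv (l : List Char) :
    (pvAllChain l → l.foldl pvAltStep (some (0, 0, 0, 0, 0, 0, 0)) =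
       some ((l.count 'q' : Int), (l.count 'u' : Int), (l.count 'a' : Int),
             (l.count 'c' : Int), (l.count 'k' : Int),
             (l.foldl pvNestStep (0, 0)).2, (l.foldl pvNestStep (0, 0)).1))
    ∧ (¬ pvAllChain l → l.foldl pvAltStep (some (0, 0, 0, 0, 0, 0, 0)) = none) := by
  induction l using List.reverseRecOn with
  | nil => exact ⟨fun _ => by simp, fun h => absurd pvAllChain_nil h⟩
  | append_singleton l x ih =>
    rw [List.foldl_append, List.foldl_append]
    by_cases hall : pvAllChain l
    · rw [ih.1 hall]
      by_cases hall' : pvAllChain (l ++ [x])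
      · have hch : pvChain (l ++ [x]) := ((pvAllChain_append l x).1 hall').2
        refine ⟨fun _ => ?_, fun h => absurd hall' h⟩
        simp only [List.foldl_cons, List.foldl_nil]
        rcases hch with ⟨h1, h2, h3, h4⟩
        simp only [List.count_append, List.count_singleton] at h1 h2 h3 h4 ⊢
        by_cases hq : x = 'q' <;> by_cases hu : x = 'u' <;> by_cases ha : x = 'a' <;>
          by_cases hc : x = 'c' <;> by_cases hk : x = 'k' <;>
          simp_all [pvAltStep, pvNestStep] <;> (try constructor) <;> (try omega)
      · have hnch : ¬ pvChain (l ++ [x]) := fun h => hall' ((pvAllChain_append l x).2 ⟨hall, h⟩)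
        refine ⟨fun h => absurd h hall', fun _ => ?_⟩
        simp only [List.foldl_cons, List.foldl_nil]
        have hch_l : pvChain l := pvChain_of_allChain hall
        rcases hch_l with ⟨h1, h2, h3, h4⟩
        simp only [pvChain, List.count_append, List.count_singleton] at hnch
        by_cases hq : x = 'q' <;> by_cases hu : x = 'u' <;> by_cases ha : x = 'a' <;>
          by_cases hc : x = 'c' <;> by_cases hk : x = 'k' <;>
          simp_all [pvAltStep] <;> omega
    · have hnall' : ¬ pvAllChain (l ++ [x]) := fun h => hall ((pvAllChain_append l x).1 h).1
      rw [ih.2 hall]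
      exact ⟨fun h => absurd h hnall', fun _ => by simp [pvAltStep]⟩

theorem pv_inner5 (v0 v1 v2 v3 v4 : Int) :
    (([v0, v1, v2, v3, v4]).foldl pvInnerStep (some (-1))).isSome = true ↔
      (-1 < v0 ∧ v0 < v1 ∧ v1 < v2 ∧ v2 < v3 ∧ v3 < v4) := by
  simp only [List.foldl_cons, List.foldl_nil, pvInnerStep]
  by_cases h0 : (-1 : Int) < v0 <;> by_cases h1 : v0 < v1 <;> by_cases h2 : v1 < v2 <;>
    by_cases h3 : v2 < v3 <;> by_cases h4 : v3 < v4 <;>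
    simp [h0, h1, h2, h3, h4]

theorem pv_check_iff (A B C D E : List Nat)
    (hB : B.length = A.length) (hC : C.length = A.length)
    (hD : D.length = A.length) (hE : E.length = A.length) :
    ((PySem.List.pyRange 0 ((A.length : Int)) 1).all (fun i =>
      (([PySem.List.pyGetD (List.map (fun j : Nat => (j : Int)) A) i 0,
         PySem.List.pyGetD (List.map (fun j : Nat => (j : Int)) B) i 0,
         PySem.List.pyGetD (List.map (fun j : Nat => (j : Int)) C) i 0,
         PySem.List.pyGetD (List.map (fun j : Nat => (j : Int)) D) i 0,
         PySem.List.pyGetD (List.map (fun j : Nat => (j : Int)) E) i 0]).foldl pvInnerStep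
        (some (-1))).isSome)) = true ↔
    ∀ k (h : k < A.length), A[k] < B[k]'(by omega) ∧ B[k]'(by omega) < C[k]'(by omega) ∧
      C[k]'(by omega) < D[k]'(by omega) ∧ D[k]'(by omega) < E[k]'(by omega) := by
  rw [PySem.List.pyRange_zero_natCast, List.all_map, List.all_eq_true]
  have key : ∀ k (hk : k < A.length),
      ((fun i =>
      (([PySem.List.pyGetD (List.map (fun j : Nat => (j : Int)) A) i 0,
         PySem.List.pyGetD (List.map (fun j : Nat => (j : Int)) B) i 0,
         PySem.List.pyGetD (List.map (fun j : Nat => (j : Int)) C) i 0,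
         PySem.List.pyGetD (List.map (fun j : Nat => (j : Int)) D) i 0,
         PySem.List.pyGetD (List.map (fun j : Nat => (j : Int)) E) i 0]).foldl pvInnerStep
        (some (-1))).isSome) ∘ (fun (k : Nat) => (k : Int))) k = true ↔
      (A[k]'(by omega) < B[k]'(by omega) ∧ B[k]'(by omega) < C[k]'(by omega) ∧
       C[k]'(by omega) < D[k]'(by omega) ∧ D[k]'(by omega) < E[k]'(by omega)) := by
    intro k hk
    have g : ∀ (X : List Nat) (hX : X.length = A.length),
        PySem.List.pyGetD (List.map (fun j : Nat => (j : Int)) X) (k : Int) 0 = ((X[k]'(by omega) : Nat) : Int) := by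
      intro X hX
      rw [PySem.List.pyGetD_natCast, List.getD_eq_getElem _ _ (by simp [hX]; omega)]
      simp
    simp only [Function.comp, g A rfl, g B hB, g C hC, g D hD, g E hE, pv_inner5]
    constructor
    · rintro ⟨-, h1, h2, h3, h4⟩
      exact ⟨by exact_mod_cast h1, by exact_mod_cast h2, by exact_mod_cast h3, by exact_mod_cast h4⟩
    · rintro ⟨h1, h2, h3, h4⟩
      refine ⟨by omega, by exact_mod_cast h1, by exact_mod_cast h2, by exact_mod_cast h3, by exact_mod_cast h4⟩
  constructor
  · intro h k hk
    exact (key k hk).1 (h _ (List.mem_range.2 hk))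
  · intro h k hk
    rw [List.mem_range] at hk
    exact (key k hk).2 (h k hk)



theorem pvI_eq (cs : List Char) (c : Char) :
    pvI cs c cs.length = List.map (fun j : Nat => (j : Int)) (pvIdx cs c) := rfl

theorem pvIdx_sorted (cs : List Char) (c : Char) : (pvIdx cs c).Pairwise (· < ·) :=
  List.Pairwise.filter _ List.pairwise_lt_range

theorem pvIdx_disjoint (cs : List Char) (c c' : Char) (hne : c ≠ c') :
    ∀ x ∈ pvIdx cs c, x ∉ pvIdx cs c' := by
  intro x hx hx'
  rw [pvIdx, List.mem_filter] at hx hx'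
  exact hne (by have h1 := hx.2; have h2 := hx'.2; simp at h1 h2; rw [← h1, ← h2])

theorem pv_pair_counts (cs : List Char) (c c' : Char) (hne : c ≠ c')
    (hlen : (pvIdx cs c).length = (pvIdx cs c').length) :
    (∀ i (h : i < (pvIdx cs c).length),
        (pvIdx cs c)[i] < (pvIdx cs c')[i]'(hlen ▸ h)) ↔
    (∀ m, (cs.take m).count c' ≤ (cs.take m).count c) := by
  rw [pv_pair_iff _ _ (pvIdx_sorted cs c) (pvIdx_sorted cs c') hlen (pvIdx_disjoint cs c c' hne)]
  constructor
  · intro h m; have := h m; rwa [pvCLt_idx, pvCLt_idx] at this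
  · intro h m; rw [pvCLt_idx, pvCLt_idx]; exact h m

theorem pv_main (s : String) : solve s = solve_alt s := by
  have hbuild := pvBuild_eq s.toList s.toList.length
  simp only [solve, solve_alt, hbuild, pvI_eq, List.length_map, pvIdx_length]
  set cs := s.toList with hcs
  by_cases htot : cs.count 'q' = cs.count 'u' ∧ cs.count 'u' = cs.count 'a' ∧
      cs.count 'a' = cs.count 'c' ∧ cs.count 'c' = cs.count 'k'
  · obtain ⟨h1, h2, h3, h4⟩ := htot
    rw [if_neg (by tauto)]
    have lq := pvIdx_length cs 'q'
    have lu := pvIdx_length cs 'u'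
    have la := pvIdx_length cs 'a'
    have lc := pvIdx_length cs 'c'
    have lk := pvIdx_length cs 'k'
    have hiff := pv_check_iff (pvIdx cs 'q') (pvIdx cs 'u') (pvIdx cs 'a') (pvIdx cs 'c')
      (pvIdx cs 'k') (by omega) (by omega) (by omega) (by omega)
    rw [show ((cs.count 'q' : Int)) = (((pvIdx cs 'q').length : Nat) : Int) by rw [lq]] at *
    by_cases hall : pvAllChain cs
    · have hch : ∀ k (h : k < (pvIdx cs 'q').length),
          (pvIdx cs 'q')[k] < (pvIdx cs 'u')[k]'(by omega) ∧
          (pvIdx cs 'u')[k]'(by omega) < (pvIdx cs 'a')[k]'(by omega) ∧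
          (pvIdx cs 'a')[k]'(by omega) < (pvIdx cs 'c')[k]'(by omega) ∧
          (pvIdx cs 'c')[k]'(by omega) < (pvIdx cs 'k')[k]'(by omega) := by
        have pqu := (pv_pair_counts cs 'q' 'u' (by decide) (by omega)).2
          (fun m => (hall m).1)
        have pua := (pv_pair_counts cs 'u' 'a' (by decide) (by omega)).2
          (fun m => (hall m).2.1)
        have pac := (pv_pair_counts cs 'a' 'c' (by decide) (by omega)).2
          (fun m => (hall m).2.2.1)
        have pck := (pv_pair_counts cs 'c' 'k' (by decide) (by omega)).2
          (fun m => (hall m).2.2.2)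
        intro k hk
        exact ⟨pqu k hk, pua k (by omega), pac k (by omega), pck k (by omega)⟩
      rw [if_neg (by simp only [hiff]; exact fun hc => hc hch)]
      rw [PySem.List.foldl_pyRange_zero_pyGetD' cs ' ' pvNestStep ((0 : Int), (0 : Int))]
      rw [(pvB_inv cs).1 hall]
      dsimp only
      rw [if_pos (show _ ∧ _ ∧ _ ∧ _ by refine ⟨?_, ?_, ?_, ?_⟩ <;> exact_mod_cast (by omega))]
    · have hnch : ¬ (∀ k (h : k < (pvIdx cs 'q').length),
          (pvIdx cs 'q')[k] < (pvIdx cs 'u')[k]'(by omega) ∧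
          (pvIdx cs 'u')[k]'(by omega) < (pvIdx cs 'a')[k]'(by omega) ∧
          (pvIdx cs 'a')[k]'(by omega) < (pvIdx cs 'c')[k]'(by omega) ∧
          (pvIdx cs 'c')[k]'(by omega) < (pvIdx cs 'k')[k]'(by omega)) := by
        intro hch
        apply hall
        have pqu := (pv_pair_counts cs 'q' 'u' (by decide) (by omega)).1
          (fun i hi => (hch i hi).1)
        have pua := (pv_pair_counts cs 'u' 'a' (by decide) (by omega)).1
          (fun i hi => (hch i (by omega)).2.1)
        have pac := (pv_pair_counts cs 'a' 'c' (by decide) (by omega)).1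
          (fun i hi => (hch i (by omega)).2.2.1)
        have pck := (pv_pair_counts cs 'c' 'k' (by decide) (by omega)).1
          (fun i hi => (hch i (by omega)).2.2.2)
        exact fun m => ⟨pqu m, pua m, pac m, pck m⟩
      rw [if_pos (by simp only [hiff]; exact fun h => hnch h)]
      rw [(pvB_inv cs).2 hall]
  · rw [if_pos (by omega)]
    by_cases hall : pvAllChain cs
    · rw [(pvB_inv cs).1 hall]
      dsimp only
      rw [if_neg (by exact_mod_cast htot)]
    · rw [(pvB_inv cs).2 hall]


-- ===== VERDICT (by name: the statement is the Claim_ definition above) =====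
theorem solve_spec : Claim_equal_solve := by
  intro s _
  show solve s = solve_alt s
  exact pv_main s
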